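-- pv_equiv track=rewrite | github.com/destabilizer/git-data-tools | message_analysis.py | categories_from_text
-- ===== SOURCE A (Python) =====
-- def categories_from_text(feattext):
--     categories = dict()
--     startNewCat = True
--     for l in feattext.split('\n'):
--         word = l.strip(' \n')
--         if word:
--             if startNewCat:
--                 curcat = word
--                 categories[curcat] = list()
--                 startNewCat = False
--             categories[curcat].append(word)
--         else:
--             startNewCat = True
--     return categories
-- ===== SOURCE B (Python) =====
-- def categories_from_text(feattext):
--     words = [l.strip(' \n') for l in feattext.split('\n')]
--     n = len(words)
--     categories = {}
--     i = 0
--     while i < n: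
--         if words[i]:
--             j = i + 1
--             while j < n and words[j]:
--                 j += 1
--             categories[words[i]] = words[i:j]
--             i = j
--         else:
--             i += 1
--     return categories
-- ===== Notes on version B (the rewrite author's own statement) =====
-- stated objective: alternative
-- what changed: Replaces the flag-driven per-line state machine (startNewCat/curcat with per-word dict appends) by a two-pointer scan over the pre-stripped word list that finds each maximal nonempty run and assigns it to the dict in one slice.
import Mathlib
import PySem

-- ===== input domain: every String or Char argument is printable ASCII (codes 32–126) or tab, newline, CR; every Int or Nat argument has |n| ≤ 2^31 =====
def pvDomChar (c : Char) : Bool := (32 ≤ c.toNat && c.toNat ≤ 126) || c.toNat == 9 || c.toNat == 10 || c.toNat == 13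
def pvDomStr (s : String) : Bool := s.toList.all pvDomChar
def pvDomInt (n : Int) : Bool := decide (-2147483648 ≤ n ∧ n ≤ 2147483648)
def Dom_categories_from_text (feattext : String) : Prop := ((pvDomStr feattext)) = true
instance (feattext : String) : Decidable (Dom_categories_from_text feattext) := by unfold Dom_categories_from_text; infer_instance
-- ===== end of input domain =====

-- B replaces A's flag-driven state machine (startNewCat/curcat, one dict append per word)
-- by a two-pointer scan over the pre-stripped word list assigning each maximal nonempty run in one slice (objective: alternative).

-- ===== PORT A =====
-- loop body of A: word is the already-stripped line; state = (categories, startNewCat, curcat)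
def aStep (st : PySem.Dict String (List String) × Bool × String) (word : String) :
    PySem.Dict String (List String) × Bool × String :=
  if word ≠ "" then
    if st.2.1 then
      -- curcat = word; categories[curcat] = list(); startNewCat = False; then the shared append
      ((st.1.insert word []).modify word [] (· ++ [word]), false, word)
    else
      (st.1.modify st.2.2 [] (· ++ [word]), false, st.2.2)
  else
    (st.1, true, st.2.2)

def categories_from_text (feattext : String) : List (String × List String) :=
  -- feattext.split('\n'): sep ≠ "", so split? is always some
  (((PySem.Str.split? feattext "\n").getD []).foldl
    (fun st l => aStep st (PySem.Str.stripChars l " \n"))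
    (PySem.Dict.empty, true, "")).1.items   -- curcat starts unset; "" is never read before the first assignment

-- ===== PORT B =====
-- inner while: j advances while j < n and words[j] is nonempty
def bScan (words : List String) (n j : Nat) : Nat :=
  if h : j < n ∧ words.getD j "" ≠ "" then bScan words n (j + 1) else j
termination_by n - j
decreasing_by omega

-- the inner while never moves j backwards (bLoop's termination cites this)
theorem bScan_ge (words : List String) (n j : Nat) : j ≤ bScan words n j := by
  rw [bScan]
  split
  · exact le_trans (Nat.le_succ j) (bScan_ge words n (j + 1))
  · exact le_refl j
termination_by n - j
decreasing_by omega

-- outer while over index i; j = bScan words n (i+1) is Python's local j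
def bLoop (words : List String) (n : Nat) (cats : PySem.Dict String (List String)) (i : Nat) :
    PySem.Dict String (List String) :=
  if h : i < n then
    if words.getD i "" ≠ "" then
      bLoop words n (cats.insert (words.getD i "")
        (PySem.List.slice words (some (i : Int)) (some ((bScan words n (i + 1)) : Int))))
        (bScan words n (i + 1))
    else
      bLoop words n cats (i + 1)
  else cats
termination_by n - i
decreasing_by
  · have := bScan_ge words n (i + 1); omega
  · omega

def categories_from_text_alt (feattext : String) : List (String × List String) :=
  (bLoop (((PySem.Str.split? feattext "\n").getD []).map (fun l => PySem.Str.stripChars l " \n"))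
    (((PySem.Str.split? feattext "\n").getD []).map (fun l => PySem.Str.stripChars l " \n")).length
    PySem.Dict.empty 0).items

-- ===== PRECONDITION & SPEC =====
def Spec_categories_from_text (feattext : String) (out : List (String × List String)) : Prop := out = categories_from_text_alt feattext
instance (feattext : String) (out : List (String × List String)) : Decidable (Spec_categories_from_text feattext out) := by unfold Spec_categories_from_text; infer_instance

-- ===== CLAIM (what is proved, stated in full; the proofs are below) =====
def Claim_equal_categories_from_text : Prop := ∀ (feattext : String), Dom_categories_from_text feattext → Spec_categories_from_text feattext (categories_from_text feattext)

-- ===== LEMMAS AND PROOFS =====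

-- common reference function: consume the word list run by run
def catSpec : List String → PySem.Dict String (List String) → PySem.Dict String (List String)
  | [], d => d
  | w :: ws, d =>
    if w = "" then catSpec ws d
    else catSpec (ws.dropWhile (· ≠ "")) (d.insert w (w :: ws.takeWhile (· ≠ "")))
termination_by ws _ => ws.length
decreasing_by
  · simp
  · have := List.length_dropWhile_le (p := fun x => decide (x ≠ "")) (l := ws)
    simp only [List.length_cons]
    omega

theorem modify_insert_self (d : PySem.Dict String (List String)) (k : String)
    (v d0 : List String) (f : List String → List String) :
    (d.insert k v).modify k d0 f = d.insert k (f v) := by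
  show (d.insert k v).insert k (f ((d.insert k v).getD k d0)) = d.insert k (f v)
  rw [PySem.Dict.getD_insert_self, PySem.Dict.insert_insert_self]

theorem dropWhile_head_empty (ws : List String) (e : String) (rest : List String)
    (h : ws.dropWhile (· ≠ "") = e :: rest) : e = "" := by
  induction ws with
  | nil => simp at h
  | cons a l ih =>
    rw [List.dropWhile_cons] at h
    split at h
    · exact ih h
    · next hcond =>
      injection h with h1 _
      simp at hcond
      rw [← h1, hcond]

-- A inside a run (startNewCat = False, current category k last written): appends the run to k
theorem aRun (ws : List String) (d : PySem.Dict String (List String)) (k : String) (v : List String) :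
    ws.foldl aStep (d.insert k v, false, k)
      = (ws.dropWhile (· ≠ "")).foldl aStep (d.insert k (v ++ ws.takeWhile (· ≠ "")), false, k) := by
  induction ws generalizing v with
  | nil => simp
  | cons w ws ih =>
    by_cases hw : w = ""
    · subst hw
      simp
    · have hstep : aStep (d.insert k v, false, k) w = (d.insert k (v ++ [w]), false, k) := by
        simp [aStep, hw, modify_insert_self]
      rw [List.foldl_cons, hstep, ih (v ++ [w])]
      simp [hw]

-- A from a category boundary (startNewCat = True) computes catSpec
theorem aMain (ws : List String) (d : PySem.Dict String (List String)) (c : String) :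
    (ws.foldl aStep (d, true, c)).1 = catSpec ws d := by
  match ws with
  | [] => simp [catSpec]
  | w :: ws =>
    by_cases hw : w = ""
    · subst hw
      have hstep : aStep (d, true, c) "" = (d, true, c) := by simp [aStep]
      rw [List.foldl_cons, hstep, aMain ws d c, catSpec]
      simp
    · have hstep : aStep (d, true, c) w = (d.insert w [w], false, w) := by
        simp [aStep, hw, modify_insert_self]
      rw [List.foldl_cons, hstep, catSpec]
      simp only [hw, if_false]
      have hrun := aRun ws d w [w]
      simp only [List.singleton_append] at hrun
      rw [hrun]
      cases hdw : ws.dropWhile (· ≠ "") with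
      | nil => simp [catSpec]
      | cons e rest =>
        have he : e = "" := dropWhile_head_empty ws e rest hdw
        subst he
        have hstep2 : aStep (d.insert w (w :: ws.takeWhile (· ≠ "")), false, w) ""
            = (d.insert w (w :: ws.takeWhile (· ≠ "")), true, w) := by simp [aStep]
        have hlen : rest.length < ws.length + 1 := by
          have h1 := List.length_dropWhile_le (p := fun x => decide (x ≠ "")) (l := ws)
          have h2 := congrArg List.length hdw
          simp only [List.length_cons] at h2
          omega
        rw [List.foldl_cons, hstep2,
          aMain rest (d.insert w (w :: ws.takeWhile (· ≠ ""))) w, catSpec]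
        simp
termination_by ws.length
decreasing_by
  · simp only [List.length_cons]; omega
  · simp only [List.length_cons]; omega

theorem bScan_eq (ws : List String) (j : Nat) :
    bScan ws ws.length j = j + ((ws.drop j).takeWhile (· ≠ "")).length := by
  rw [bScan]
  split
  · next h =>
    obtain ⟨hj, hne⟩ := h
    have hget : ws.getD j "" = ws[j] := List.getD_eq_getElem ws "" hj
    have hdrop : ws.drop j = ws[j] :: ws.drop (j + 1) := List.drop_eq_getElem_cons hj
    rw [bScan_eq ws (j + 1), hdrop, List.takeWhile_cons]
    rw [hget] at hne
    simp [hne]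
    omega
  · next h =>
    by_cases hj : j < ws.length
    · have hget : ws.getD j "" = ws[j] := List.getD_eq_getElem ws "" hj
      have hempty : ws[j] = "" := by
        by_contra hne
        exact h ⟨hj, by rw [hget]; exact hne⟩
      rw [List.drop_eq_getElem_cons hj, List.takeWhile_cons]
      simp [hempty]
    · have : ws.drop j = [] := List.drop_eq_nil_of_le (by omega)
      simp [this]
termination_by ws.length - j
decreasing_by omega

theorem dropWhile_eq_drop (p : String → Bool) (l : List String) :
    l.dropWhile p = l.drop (l.takeWhile p).length := by
  calc l.dropWhile p
      = ((l.takeWhile p) ++ (l.dropWhile p)).drop (l.takeWhile p).length :=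
        List.drop_left.symm
    _ = l.drop (l.takeWhile p).length := by rw [List.takeWhile_append_dropWhile]

theorem bMain (ws : List String) (d : PySem.Dict String (List String)) (i : Nat) :
    bLoop ws ws.length d i = catSpec (ws.drop i) d := by
  rw [bLoop]
  split
  · next hi =>
    have hget : ws.getD i "" = ws[i] := List.getD_eq_getElem ws "" hi
    have hdrop : ws.drop i = ws[i] :: ws.drop (i + 1) := List.drop_eq_getElem_cons hi
    split
    · next hne =>
      rw [hget] at hne
      have hij := bScan_ge ws ws.length (i + 1)
      have hscan : bScan ws ws.length (i + 1)
          = (i + 1) + ((ws.drop (i + 1)).takeWhile (· ≠ "")).length := bScan_eq ws (i + 1)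
      have hpre : (ws.drop (i + 1)).takeWhile (· ≠ "")
          = (ws.drop (i + 1)).take ((ws.drop (i + 1)).takeWhile (· ≠ "")).length :=
        List.prefix_iff_eq_take.mp (List.takeWhile_prefix _)
      have hslice : PySem.List.slice ws (some (i : Int)) (some ((bScan ws ws.length (i + 1)) : Int))
          = ws[i] :: (ws.drop (i + 1)).takeWhile (· ≠ "") := by
        have hcast : ((bScan ws ws.length (i + 1) : Nat) : Int)
            = (i : Int) + ((1 + ((ws.drop (i + 1)).takeWhile (· ≠ "")).length : Nat) : Int) := by
          rw [hscan]; push_cast; ring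
        rw [hcast, PySem.List.slice_natCast_add, hdrop]
        rw [show 1 + ((ws.drop (i + 1)).takeWhile (· ≠ "")).length
            = ((ws.drop (i + 1)).takeWhile (· ≠ "")).length + 1 by omega]
        rw [List.take_succ_cons, ← hpre]
      have hdropj : ws.drop (bScan ws ws.length (i + 1))
          = (ws.drop (i + 1)).dropWhile (· ≠ "") := by
        rw [hscan]
        have hdd : ws.drop ((i + 1) + ((ws.drop (i + 1)).takeWhile (· ≠ "")).length)
            = (ws.drop (i + 1)).drop ((ws.drop (i + 1)).takeWhile (· ≠ "")).length := by
          rw [List.drop_drop]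
        rw [hdd, ← dropWhile_eq_drop]
      rw [hget, hslice, bMain ws (d.insert ws[i] (ws[i] :: (ws.drop (i + 1)).takeWhile (· ≠ "")))
        (bScan ws ws.length (i + 1)), hdropj, hdrop, catSpec]
      simp [hne]
    · next hne =>
      rw [hget] at hne
      have hempty : ws[i] = "" := by by_contra hx; exact hne hx
      rw [bMain ws d (i + 1), hdrop, catSpec]
      simp [hempty]
  · next hi =>
    have : ws.drop i = [] := List.drop_eq_nil_of_le (by omega)
    rw [this]
    simp [catSpec]
termination_by ws.length - i
decreasing_by
  · omega
  · omega

-- ===== VERDICT (by name: the statement is the Claim_ definition above) =====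
theorem categories_from_text_spec : Claim_equal_categories_from_text := by
  intro f _
  unfold Spec_categories_from_text categories_from_text categories_from_text_alt
  rw [← List.foldl_map]
  rw [aMain, bMain, List.drop_zero]
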